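-- pv_equiv track=rewrite | github.com/Zeeeepa/graph-sitter | src/graph_sitter/extensions/lsp/serena/realtime/realtime_analyzer.py | _calculate_code_metrics
-- ===== SOURCE A (Python) =====
-- from typing import Dict, List, Optional, Any, Set
--
-- def _calculate_code_metrics(content: str, lines: List[str]) -> Dict[str, Any]:
--     """Calculate basic code metrics."""
--     metrics = {
--         'total_lines': len(lines),
--         'code_lines': 0,
--         'comment_lines': 0,
--         'blank_lines': 0,
--         'function_count': 0,
--         'class_count': 0,
--         'complexity_estimate': 0
--     }
--
--     for line in lines:
--         stripped = line.strip()
--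
--         if not stripped:
--             metrics['blank_lines'] += 1
--         elif stripped.startswith('#'):
--             metrics['comment_lines'] += 1
--         else:
--             metrics['code_lines'] += 1
--
--             # Count functions and classes
--             if stripped.startswith('def '):
--                 metrics['function_count'] += 1
--             elif stripped.startswith('class '):
--                 metrics['class_count'] += 1
--
--             # Simple complexity estimate
--             complexity_keywords = ['if', 'elif', 'else', 'for', 'while', 'try', 'except', 'with']
--             for keyword in complexity_keywords:
--                 if f' {keyword} ' in f' {stripped} ' or stripped.startswith(f'{keyword} '):
--                     metrics['complexity_estimate'] += 1
--
--     return metrics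
-- ===== SOURCE B (Python) =====
-- def _calculate_code_metrics(content, lines):
--     """Calculate basic code metrics (multi-pass decomposition)."""
--     stripped = [line.strip() for line in lines]
--     code = [s for s in stripped if s and not s.startswith('#')]
--     keywords = ['if', 'elif', 'else', 'for', 'while', 'try', 'except', 'with']
--     return {
--         'total_lines': len(lines),
--         'code_lines': len(code),
--         'comment_lines': sum(1 for s in stripped if s and s.startswith('#')),
--         'blank_lines': stripped.count(''),
--         'function_count': sum(1 for s in code if s.startswith('def ')),
--         'class_count': sum(1 for s in code if s.startswith('class ')),
--         'complexity_estimate': sum(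
--             1 for s in code for k in keywords
--             if f' {k} ' in f' {s} ' or s.startswith(f'{k} ')
--         ),
--     }
-- ===== Notes on version B (the rewrite author's own statement) =====
-- stated objective: alternative
-- what changed: The single accumulating loop that mutates a dict of seven counters is replaced by independent passes: strip once, then compute each metric by its own filter/count/sum over the stripped (or code-only) lines, assembling the dict in one literal.
import Mathlib
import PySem

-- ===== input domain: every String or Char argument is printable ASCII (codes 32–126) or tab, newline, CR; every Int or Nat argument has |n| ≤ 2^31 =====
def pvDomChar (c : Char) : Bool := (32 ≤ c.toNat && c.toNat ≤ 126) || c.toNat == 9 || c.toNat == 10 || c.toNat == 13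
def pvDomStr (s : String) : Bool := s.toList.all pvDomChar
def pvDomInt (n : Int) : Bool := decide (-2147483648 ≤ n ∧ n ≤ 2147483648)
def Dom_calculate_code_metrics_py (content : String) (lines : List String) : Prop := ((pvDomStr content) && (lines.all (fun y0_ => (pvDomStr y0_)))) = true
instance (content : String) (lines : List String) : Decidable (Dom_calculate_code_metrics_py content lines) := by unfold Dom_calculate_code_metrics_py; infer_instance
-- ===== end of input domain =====

-- B restructures A's single accumulating loop into independent filter/count/sum passes; objective: alternative decomposition (same cost).

-- shared literalisation of the identical Python expressions both versions contain
def pvKeywords : List (List Char) :=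
  ["if".toList, "elif".toList, "else".toList, "for".toList, "while".toList, "try".toList, "except".toList, "with".toList]

-- f' {keyword} ' in f' {stripped} ' or stripped.startswith(f'{keyword} ')
def pvKwHit (stripped kw : List Char) : Bool :=
  PySem.Chars.isIn (' ' :: (kw ++ [' '])) (' ' :: (stripped ++ [' '])) ||
  PySem.Chars.startswith stripped (kw ++ [' '])

-- ===== PORT A =====
-- A's loop: one fold over lines carrying the six mutable counters
-- (code, comment, blank, function, class, complexity); dict assembled at the end.
def pvStepA (m : Int × Int × Int × Int × Int × Int) (line : String) : Int × Int × Int × Int × Int × Int :=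
  let (code, com, blank, fn, cls, cx) := m
  let stripped := PySem.Chars.strip line.toList
  if stripped.isEmpty then (code, com, blank + 1, fn, cls, cx)
  else if PySem.Chars.startswith stripped ['#'] then (code, com + 1, blank, fn, cls, cx)
  else
    let fncls :=
      if PySem.Chars.startswith stripped "def ".toList then (fn + 1, cls)
      else if PySem.Chars.startswith stripped "class ".toList then (fn, cls + 1)
      else (fn, cls)
    let cx := pvKeywords.foldl (fun acc kw => if pvKwHit stripped kw then acc + 1 else acc) cx
    (code + 1, com, blank, fncls.1, fncls.2, cx)

def calculate_code_metrics_py (content : String) (lines : List String) : List (String × Int) :=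
  let m := lines.foldl pvStepA (0, 0, 0, 0, 0, 0)
  [("total_lines", (lines.length : Int)), ("code_lines", m.1), ("comment_lines", m.2.1),
   ("blank_lines", m.2.2.1), ("function_count", m.2.2.2.1), ("class_count", m.2.2.2.2.1),
   ("complexity_estimate", m.2.2.2.2.2)]

-- ===== PORT B =====
-- B: strip once, then independent passes (filters / counts / sums).
def calculate_code_metrics_py_alt (content : String) (lines : List String) : List (String × Int) :=
  let stripped := lines.map (fun line => PySem.Chars.strip line.toList)
  let code := stripped.filter (fun s => !s.isEmpty && !PySem.Chars.startswith s ['#'])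
  [("total_lines", (lines.length : Int)),
   ("code_lines", (code.length : Int)),
   ("comment_lines", ((stripped.countP (fun s => !s.isEmpty && PySem.Chars.startswith s ['#'])) : Int)),
   ("blank_lines", ((stripped.count []) : Int)),
   ("function_count", ((code.countP (fun s => PySem.Chars.startswith s "def ".toList)) : Int)),
   ("class_count", ((code.countP (fun s => PySem.Chars.startswith s "class ".toList)) : Int)),
   ("complexity_estimate", (code.map (fun s => ((pvKeywords.countP (pvKwHit s)) : Int))).sum)]

-- ===== PRECONDITION & SPEC =====
def Spec_calculate_code_metrics_py (content : String) (lines : List String) (out : List (String × Int)) : Prop := out = calculate_code_metrics_py_alt content lines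
instance (content : String) (lines : List String) (out : List (String × Int)) : Decidable (Spec_calculate_code_metrics_py content lines out) := by unfold Spec_calculate_code_metrics_py; infer_instance

-- ===== CLAIM (what is proved, stated in full; the proofs are below) =====
def Claim_equal_calculate_code_metrics_py : Prop := ∀ (content : String) (lines : List String), Dom_calculate_code_metrics_py content lines → Spec_calculate_code_metrics_py content lines (calculate_code_metrics_py content lines)

-- ===== LEMMAS AND PROOFS =====

-- loop invariant: A's fold adds B's per-metric counts to any starting accumulator
theorem pvFoldA_eq (ls : List String) (c cm b f cl cx : Int) :
    ls.foldl pvStepA (c, cm, b, f, cl, cx) =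
      (let stripped := ls.map (fun line => PySem.Chars.strip line.toList)
       let code := stripped.filter (fun s => !s.isEmpty && !PySem.Chars.startswith s ['#'])
       (c + (code.length : Int),
        cm + ((stripped.countP (fun s => !s.isEmpty && PySem.Chars.startswith s ['#'])) : Int),
        b + ((stripped.count []) : Int),
        f + ((code.countP (fun s => PySem.Chars.startswith s "def ".toList)) : Int),
        cl + ((code.countP (fun s => PySem.Chars.startswith s "class ".toList)) : Int),
        cx + (code.map (fun s => ((pvKeywords.countP (pvKwHit s)) : Int))).sum)) := by
  induction ls generalizing c cm b f cl cx with
  | nil => simp [List.count]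
  | cons hd tl ih =>
    simp only [List.foldl_cons, pvStepA, List.map_cons]
    generalize PySem.Chars.strip hd.toList = s
    by_cases h1 : s.isEmpty
    · have he : s = [] := List.isEmpty_iff.mp h1
      rw [ih]
      simp only [he, List.filter_cons, List.countP_cons, List.count_cons]
      simp
      try (push_cast; ring_nf)
      try simp [add_comm]
    · have hne : ¬ s = [] := by simpa using (List.isEmpty_iff (l := s)).not.mp h1
      by_cases h2 : PySem.Chars.startswith s ['#']
      · rw [ih]
        simp only [List.filter_cons, List.countP_cons, List.count_cons, h1, h2]
        simp [hne]
        try (push_cast; ring_nf)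
        try simp [add_comm]
      · simp only [h1, h2, Bool.false_eq_true, ite_false]
        rw [PySem.List.foldl_if_add_one, ih]
        simp only [List.filter_cons, List.countP_cons, List.count_cons, List.map_cons, List.sum_cons, h1, h2]
        simp [hne]
        refine ⟨by push_cast; ring, ?_, ?_, by push_cast; ring⟩
        · by_cases hd1 : PySem.Chars.startswith s ['d','e','f',' '] <;>
            (try simp [hd1, List.countP_cons]) <;> (try push_cast) <;> (try ring) <;>
            (try (split <;> rfl))
        · by_cases hd1 : PySem.Chars.startswith s ['d','e','f',' '] <;>
            by_cases hd2 : PySem.Chars.startswith s ['c','l','a','s','s',' '] <;>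
            (try simp [hd1, hd2, List.countP_cons]) <;> (try push_cast) <;> (try ring) <;>
            (try (split <;> rfl))
          obtain ⟨t1, e1⟩ := (PySem.Chars.startswith_iff s ['d','e','f',' ']).mp hd1
          obtain ⟨t2, e2⟩ := (PySem.Chars.startswith_iff s ['c','l','a','s','s',' ']).mp hd2
          rw [← e1] at e2
          simp at e2

-- ===== VERDICT (by name: the statement is the Claim_ definition above) =====
theorem calculate_code_metrics_py_spec : Claim_equal_calculate_code_metrics_py := by
  intro content lines _
  show _ = _
  simp only [calculate_code_metrics_py, calculate_code_metrics_py_alt]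
  rw [pvFoldA_eq]
  simp
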